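-- pv_equiv track=rewrite | github.com/UmidMuzrapov/python | wordSearch/src/word_search.py | get_letter1_locations
-- ===== SOURCE A (Python) =====
-- def get_letter1_locations(grid, word_lst):
-- 	"""
-- 	This function find the first letter locations of each word,
-- 	and build a dictionary, where key is a word, and value is
-- 	a list of locations.
-- 	Pre-condition: Number of elements in each row of grid is
-- 	the same.
-- 	:param grid: a list of tuple, our crossword
-- 	:param word_lst: list, words the code should find.
-- 	:return:
-- 	letter1_dictionary: word-location_list dictionary.
-- 	"""
-- 	letter1_dict = {}
-- 	# Check each letter if it is equal to the first letter.
-- 	for word in word_lst: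
-- 		letter1 = word[0]
-- 		letter1_locations = []
--
-- 		for r_numb in range(len(grid)):
-- 			for c_numb in range(len(grid[0])):
-- 				if grid[r_numb][c_numb] == letter1:
-- 					letter1_locations.append((r_numb, c_numb))
--
-- 		letter1_dict[word] = letter1_locations
--
-- 	return letter1_dict
-- ===== SOURCE B (Python) =====
-- def get_letter1_locations(grid, word_lst):
-- 	"""One pass over the grid builds a cell -> locations index; each word is then a dictionary lookup."""
-- 	loc = {}
-- 	for r in range(len(grid)):
-- 		row = grid[r]
-- 		for c in range(len(row)):
-- 			loc.setdefault(row[c], []).append((r, c))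
-- 	return {word: loc.get(word[0], []) for word in word_lst}
-- ===== Notes on version B (the rewrite author's own statement) =====
-- stated objective: faster
-- what changed: Instead of rescanning the whole grid once per word, B makes a single pass over the grid building a cell->locations dictionary and then answers each word by one lookup of its first letter.
-- outside the precondition, e.g. on get_letter1_locations([['a'], ['b', 'a']], ['a']): A returns {'a': [(0, 0)]}, B returns {'a': [(0, 0), (1, 1)]}
import Mathlib
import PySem

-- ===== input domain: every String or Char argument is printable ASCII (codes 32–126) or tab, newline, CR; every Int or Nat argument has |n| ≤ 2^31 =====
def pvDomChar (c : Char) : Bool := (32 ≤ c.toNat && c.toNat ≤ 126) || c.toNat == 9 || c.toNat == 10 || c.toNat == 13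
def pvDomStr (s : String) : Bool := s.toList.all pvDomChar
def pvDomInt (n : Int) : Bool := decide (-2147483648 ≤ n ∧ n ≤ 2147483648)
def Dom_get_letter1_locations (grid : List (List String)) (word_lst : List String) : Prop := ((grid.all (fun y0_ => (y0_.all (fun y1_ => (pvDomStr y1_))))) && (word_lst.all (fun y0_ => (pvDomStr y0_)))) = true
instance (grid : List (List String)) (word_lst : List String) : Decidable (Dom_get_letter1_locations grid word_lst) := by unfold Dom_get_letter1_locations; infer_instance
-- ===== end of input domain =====

-- ===== PORT A =====
-- B replaces A's per-word full grid rescan by one grid pass building a cell -> locations dictionary (faster).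
def get_letter1_locations (grid : List (List String)) (word_lst : List String) : List (String × List (Int × Int)) :=
  (word_lst.foldl (fun (d : PySem.Dict String (List (Int × Int))) word =>
      let letter1 : String := ((PySem.Str.pyGet? word 0).map (fun ch => String.ofList [ch])).getD ""
      let locs : List (Int × Int) :=
        (PySem.List.pyRange 0 grid.length 1).foldl (fun acc r =>
          (PySem.List.pyRange 0 (PySem.List.pyGetD grid 0 []).length 1).foldl (fun acc c =>
            if PySem.List.pyGetD (PySem.List.pyGetD grid r []) c "" = letter1 then acc ++ [(r, c)]
            else acc) acc) []
      d.insert word locs) PySem.Dict.empty).items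

-- ===== PORT B =====
def get_letter1_locations_alt (grid : List (List String)) (word_lst : List String) : List (String × List (Int × Int)) :=
  let loc : PySem.Dict String (List (Int × Int)) :=
    (PySem.List.pyRange 0 grid.length 1).foldl (fun d r =>
      let row := PySem.List.pyGetD grid r []
      (PySem.List.pyRange 0 row.length 1).foldl (fun d c =>
        d.modify (PySem.List.pyGetD row c "") [] (fun xs => xs ++ [(r, c)])) d) PySem.Dict.empty
  (word_lst.foldl (fun (out : PySem.Dict String (List (Int × Int))) word =>
      out.insert word (loc.getD (((PySem.Str.pyGet? word 0).map (fun ch => String.ofList [ch])).getD "") [])) PySem.Dict.empty).items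

-- ===== PRECONDITION & SPEC =====
-- Pre_ excludes (a) word lists containing the empty word (A raises IndexError on word[0]) and
-- (b) when there are words, ragged grids: a row shorter than row 0 makes A raise IndexError, and a row
-- longer than row 0 is ignored past column len(grid[0]) by A, violating A's own stated pre-condition
-- ("Number of elements in each row of grid is the same"), so B naturally indexes those extra cells too.
def Pre_get_letter1_locations (grid : List (List String)) (word_lst : List String) : Prop :=
  (∀ w ∈ word_lst, w ≠ "") ∧
  (word_lst = [] ∨ ∀ row ∈ grid, row.length = (grid.headD []).length)
instance (grid : List (List String)) (word_lst : List String) : Decidable (Pre_get_letter1_locations grid word_lst) := by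
  unfold Pre_get_letter1_locations; infer_instance
def pvWitness_get_letter1_locations : List (List String) × List String :=
  ([["a", "b"], ["c", "a"]], ["ax", "c"])

def Spec_get_letter1_locations (grid : List (List String)) (word_lst : List String) (out : List (String × List (Int × Int))) : Prop := out = get_letter1_locations_alt grid word_lst
instance (grid : List (List String)) (word_lst : List String) (out : List (String × List (Int × Int))) : Decidable (Spec_get_letter1_locations grid word_lst out) := by unfold Spec_get_letter1_locations; infer_instance

-- ===== CLAIM (what is proved, stated in full; the proofs are below) =====
def Claim_equal_get_letter1_locations : Prop := ∀ (grid : List (List String)) (word_lst : List String), Dom_get_letter1_locations grid word_lst → Pre_get_letter1_locations grid word_lst → Spec_get_letter1_locations grid word_lst (get_letter1_locations grid word_lst)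
-- ===== LEMMAS AND PROOFS =====

-- The value B's dictionary holds at any key k equals the list A's double loop collects for k,
-- provided every row has the length of row 0.
lemma loc_getD_eq (grid : List (List String))
    (hsh : ∀ row ∈ grid, row.length = (grid.headD []).length) (k : String) :
    ((PySem.List.pyRange 0 grid.length 1).foldl (fun d r =>
        let row := PySem.List.pyGetD grid r []
        (PySem.List.pyRange 0 row.length 1).foldl (fun d c =>
          d.modify (PySem.List.pyGetD row c "") [] (fun xs => xs ++ [(r, c)])) d)
      (PySem.Dict.empty : PySem.Dict String (List (Int × Int)))).getD k []
    = (PySem.List.pyRange 0 grid.length 1).foldl (fun acc r =>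
        (PySem.List.pyRange 0 (PySem.List.pyGetD grid 0 []).length 1).foldl (fun acc c =>
          if PySem.List.pyGetD (PySem.List.pyGetD grid r []) c "" = k then acc ++ [(r, c)]
          else acc) acc) [] := by
  -- B side: flatten the nested fold into one fold of `modify` over a flat (cell, location) list
  have hB : ((PySem.List.pyRange 0 grid.length 1).foldl (fun d r =>
        let row := PySem.List.pyGetD grid r []
        (PySem.List.pyRange 0 row.length 1).foldl (fun d c =>
          d.modify (PySem.List.pyGetD row c "") [] (fun xs => xs ++ [(r, c)])) d)
      (PySem.Dict.empty : PySem.Dict String (List (Int × Int))))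
      = (((PySem.List.pyRange 0 grid.length 1).flatMap (fun r =>
            (PySem.List.pyRange 0 (PySem.List.pyGetD grid r []).length 1).map
              (fun c => (PySem.List.pyGetD (PySem.List.pyGetD grid r []) c "", ((r : Int), c))))).foldl
          (fun d p => d.modify p.1 [] (fun xs => xs ++ [p.2])) PySem.Dict.empty) := by
    rw [List.foldl_flatMap]
    refine PySem.List.foldl_congr_mem _ _ _ _ ?_
    intro d r _
    simp only [List.foldl_map]
  rw [hB, PySem.Dict.getD_foldl_modify_append, PySem.Dict.getD_empty, List.nil_append,
    List.filter_flatMap, List.map_flatMap]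
  -- A side: turn the nested append-fold into a flatMap of per-row filtered maps
  have hA : ∀ (accf : List (Int × Int)),
      (PySem.List.pyRange 0 grid.length 1).foldl (fun acc r =>
        (PySem.List.pyRange 0 (PySem.List.pyGetD grid 0 []).length 1).foldl (fun acc c =>
          if PySem.List.pyGetD (PySem.List.pyGetD grid r []) c "" = k then acc ++ [(r, c)]
          else acc) acc) accf
      = accf ++ (PySem.List.pyRange 0 grid.length 1).flatMap (fun r =>
          ((PySem.List.pyRange 0 (PySem.List.pyGetD grid 0 []).length 1).filter
              (fun c => PySem.List.pyGetD (PySem.List.pyGetD grid r []) c "" == k)).map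
            (fun c => ((r : Int), c))) := by
    intro accf
    have h1 : ∀ (r : Int), (fun acc c =>
          if PySem.List.pyGetD (PySem.List.pyGetD grid r []) c "" = k then acc ++ [((r : Int), c)]
          else acc)
        = (fun (acc : List (Int × Int)) (c : Int) =>
            if (PySem.List.pyGetD (PySem.List.pyGetD grid r []) c "" == k) = true then
              acc ++ [((r : Int), c)] else acc) := by
      intro r; funext acc c; simp [beq_iff_eq]
    have h2 : (fun (acc : List (Int × Int)) (r : Int) =>
          (PySem.List.pyRange 0 (PySem.List.pyGetD grid 0 []).length 1).foldl (fun acc c =>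
            if PySem.List.pyGetD (PySem.List.pyGetD grid r []) c "" = k then acc ++ [(r, c)]
            else acc) acc)
        = (fun (acc : List (Int × Int)) (r : Int) =>
            acc ++ ((PySem.List.pyRange 0 (PySem.List.pyGetD grid 0 []).length 1).filter
                (fun c => PySem.List.pyGetD (PySem.List.pyGetD grid r []) c "" == k)).map
              (fun c => ((r : Int), c))) := by
      funext acc r
      rw [h1 r, PySem.List.foldl_append_if]
    rw [h2, PySem.List.foldl_append_eq_flatMap]
  rw [hA, List.nil_append]
  -- both sides are flatMaps over the rows; identify them row by row
  refine (List.flatMap_congr ?_).symm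
  intro r hr
  rw [PySem.List.mem_pyRange_one] at hr
  have hmem : PySem.List.pyGetD grid r [] ∈ grid :=
    PySem.List.pyGetD_mem grid [] (by constructor <;> omega)
  have hlen0 : (PySem.List.pyGetD grid 0 []).length = (grid.headD []).length := by
    cases grid with
    | nil => simp at hr; omega
    | cons g gs => simp [PySem.List.pyGetD_zero]
  have hlen : (PySem.List.pyGetD grid 0 []).length = (PySem.List.pyGetD grid r []).length := by
    rw [hlen0, hsh _ hmem]
  rw [hlen, List.filter_map]
  simp [List.map_map, Function.comp_def]

-- ===== VERDICT (by name: the statement is the Claim_ definition above) =====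
theorem get_letter1_locations_spec : Claim_equal_get_letter1_locations := by
  intro grid word_lst _ hpre
  unfold Spec_get_letter1_locations get_letter1_locations get_letter1_locations_alt
  rcases hpre with ⟨-, hsh⟩
  rcases hsh with hnil | hsh
  · subst hnil; rfl
  · congr 1
    refine PySem.List.foldl_congr_mem _ _ _ _ ?_
    intro d word _
    simp only []
    rw [loc_getD_eq grid hsh]
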